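-- pv_equiv track=rewrite | github.com/melqkiades/yelp | source/python/topicmodeling/context/lda_based_context.py | separate_reviews
-- ===== SOURCE A (Python) =====
-- def separate_reviews(records):
--
--     specific_reviews = []
--     generic_reviews = []
--
--     for record in records:
--         if record['predicted_class'] == 'specific':
--             specific_reviews.append(record)
--         if record['predicted_class'] == 'generic':
--             generic_reviews.append(record)
--
--     return specific_reviews, generic_reviews
-- ===== SOURCE B (Python) =====
-- def separate_reviews(records):
--     def of_class(label):
--         return [record for record in records if record['predicted_class'] == label]
--     return of_class('specific'), of_class('generic')
-- ===== Notes on version B (the rewrite author's own statement) =====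
-- stated objective: simpler
-- what changed: Replaces A's single loop maintaining two accumulator lists via two if-branches by two independent staged filter passes (a comprehension per class label), with no mutable accumulators.
import Mathlib
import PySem

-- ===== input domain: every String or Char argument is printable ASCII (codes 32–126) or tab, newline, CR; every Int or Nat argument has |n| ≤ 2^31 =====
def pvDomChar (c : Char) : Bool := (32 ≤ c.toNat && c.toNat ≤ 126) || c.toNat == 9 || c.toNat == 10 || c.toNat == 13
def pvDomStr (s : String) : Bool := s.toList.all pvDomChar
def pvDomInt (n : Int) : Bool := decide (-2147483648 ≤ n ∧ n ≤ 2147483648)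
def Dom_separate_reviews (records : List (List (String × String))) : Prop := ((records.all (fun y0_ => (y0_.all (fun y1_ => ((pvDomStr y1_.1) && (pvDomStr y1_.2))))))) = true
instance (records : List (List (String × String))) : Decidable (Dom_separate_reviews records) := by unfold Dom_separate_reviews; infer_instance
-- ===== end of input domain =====

-- B replaces A's single two-branch accumulator loop by two independent filter passes (no mutable state); return value only.
-- record['predicted_class']: first-match association-list lookup (none = KeyError, excluded by Pre_)
def pvKey? (r : List (String × String)) : Option String :=
  (r.find? (fun p => p.1 == "predicted_class")).map (·.2)

-- ===== PORT A =====
-- two accumulator lists, one conditional append per branch, in A's branch order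
def separate_reviews (records : List (List (String × String))) : (List (List (String × String))) × (List (List (String × String))) :=
  records.foldl (fun st record =>
    let st1 := if pvKey? record == some "specific" then (st.1 ++ [record], st.2) else st
    if pvKey? record == some "generic" then (st1.1, st1.2 ++ [record]) else st1)
    ([], [])

-- ===== PORT B =====
-- of_class(label) = one comprehension pass over records keeping the records of that class
def of_class (records : List (List (String × String))) (label : String) : List (List (String × String)) :=
  records.filter (fun record => pvKey? record == some label)

def separate_reviews_alt (records : List (List (String × String))) : (List (List (String × String))) × (List (List (String × String))) :=
  (of_class records "specific", of_class records "generic")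

-- ===== PRECONDITION & SPEC =====
-- Pre_ excludes exactly the records without a 'predicted_class' key, on which Python A raises KeyError.
def Pre_separate_reviews (records : List (List (String × String))) : Prop :=
  (records.all (fun r => r.any (fun p => p.1 == "predicted_class"))) = true
instance (records : List (List (String × String))) : Decidable (Pre_separate_reviews records) := by unfold Pre_separate_reviews; infer_instance

def pvWitness_separate_reviews : (List (List (String × String))) :=
  [[("predicted_class", "specific")], [("predicted_class", "generic")], [("predicted_class", "other")]]

def Spec_separate_reviews (records : List (List (String × String))) (out : (List (List (String × String))) × (List (List (String × String)))) : Prop := out = separate_reviews_alt records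
instance (records : List (List (String × String))) (out : (List (List (String × String))) × (List (List (String × String)))) : Decidable (Spec_separate_reviews records out) := by unfold Spec_separate_reviews; infer_instance

-- ===== CLAIM =====
def Claim_equal_separate_reviews : Prop := ∀ (records : List (List (String × String))), Dom_separate_reviews records → Pre_separate_reviews records → Spec_separate_reviews records (separate_reviews records)

-- ===== LEMMAS AND PROOFS =====

-- A's loop, with its accumulators generalized, computes the two filters
theorem sepA_loop (l : List (List (String × String)))
    (s g : List (List (String × String))) :
    l.foldl (fun st record =>
      let st1 := if pvKey? record == some "specific" then (st.1 ++ [record], st.2) else st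
      if pvKey? record == some "generic" then (st1.1, st1.2 ++ [record]) else st1) (s, g)
    = (s ++ l.filter (fun r => pvKey? r == some "specific"),
       g ++ l.filter (fun r => pvKey? r == some "generic")) := by
  induction l generalizing s g with
  | nil => simp
  | cons r t ih =>
    simp only [List.foldl_cons, List.filter_cons]
    by_cases h1 : pvKey? r == some "specific" <;> by_cases h2 : pvKey? r == some "generic" <;>
      simp [h1, h2] at ih ⊢ <;> rw [ih] <;> simp

-- ===== VERDICT =====
theorem separate_reviews_spec : Claim_equal_separate_reviews := by
  intro records _ _
  unfold Spec_separate_reviews separate_reviews separate_reviews_alt of_class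
  rw [sepA_loop]
  simp
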